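-- pv_equiv track=rewrite | github.com/WormW/nanobot | nanobot/agent/tools/approval.py | _tool_requires_approval
-- ===== SOURCE A (Python) =====
-- def _tool_requires_approval(tool_name: str) -> bool:
--     """Check if a tool requires approval based on name patterns.
--
--     This is a fallback when we can't access the actual tool instance.
--     """
--     # List of dangerous tools that always require approval
--     dangerous_patterns = [
--         "exec",
--         "shell",
--         "spawn",
--         "write_file",
--         "edit_file",
--         "delete",
--         "remove",
--         "torrent",
--         "download",
--     ]
--     return any(pattern in tool_name.lower() for pattern in dangerous_patterns)
-- ===== SOURCE B (Python) =====
-- # B: index the dangerous patterns by first character once, then make one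
-- # position-major pass over the lowercased name, testing only the patterns
-- # whose first character matches at that position (startswith at an offset).
-- _DANGEROUS = [
--     "exec",
--     "shell",
--     "spawn",
--     "write_file",
--     "edit_file",
--     "delete",
--     "remove",
--     "torrent",
--     "download",
-- ]
--
-- _BY_FIRST = {}
-- for _p in _DANGEROUS:
--     _BY_FIRST.setdefault(_p[0], []).append(_p)
--
--
-- def _tool_requires_approval(tool_name: str) -> bool:
--     """Check if a tool requires approval based on name patterns.
--
--     This is a fallback when we can't access the actual tool instance.
--     """
--     s = tool_name.lower()
--     for i, c in enumerate(s):
--         for p in _BY_FIRST.get(c, ()):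
--             if s.startswith(p, i):
--                 return True
--     return False
-- ===== Notes on version B (the rewrite author's own statement) =====
-- stated objective: alternative
-- what changed: Instead of nine independent pattern-major substring scans of the whole name, B builds a first-character index (dict from char to candidate patterns) once and makes a single position-major pass over the lowercased name, testing at each position only the patterns whose first character matches there via an offset startswith.
import Mathlib
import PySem

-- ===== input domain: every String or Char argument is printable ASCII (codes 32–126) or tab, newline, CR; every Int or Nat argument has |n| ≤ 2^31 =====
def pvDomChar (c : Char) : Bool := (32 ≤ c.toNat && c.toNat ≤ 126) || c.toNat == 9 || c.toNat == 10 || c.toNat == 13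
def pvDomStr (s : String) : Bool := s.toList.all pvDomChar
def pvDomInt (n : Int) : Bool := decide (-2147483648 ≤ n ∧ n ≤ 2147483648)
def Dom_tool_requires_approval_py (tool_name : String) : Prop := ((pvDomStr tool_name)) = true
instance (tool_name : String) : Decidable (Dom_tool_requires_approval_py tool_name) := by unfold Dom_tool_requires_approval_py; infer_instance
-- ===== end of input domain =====

-- B replaces A's nine pattern-major 'in' scans with a first-character index built once
-- and a single position-major pass testing only matching-first-char candidates; same results.


-- ===== PORT A =====
-- literal port: any(pattern in tool_name.lower() for pattern in dangerous_patterns)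
def tool_requires_approval_py (tool_name : String) : Bool :=
  let dangerous_patterns : List String :=
    ["exec", "shell", "spawn", "write_file", "edit_file",
     "delete", "remove", "torrent", "download"]
  dangerous_patterns.any (fun pattern => PySem.Str.isIn pattern (PySem.Str.lower tool_name))

-- ===== PORT B =====
-- module-level _DANGEROUS
def dangerousList : List (List Char) :=
  ["exec".toList, "shell".toList, "spawn".toList, "write_file".toList, "edit_file".toList,
   "delete".toList, "remove".toList, "torrent".toList, "download".toList]

-- module-level _BY_FIRST: for p in _DANGEROUS: _BY_FIRST.setdefault(p[0], []).append(p)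
def byFirst : PySem.Dict Char (List (List Char)) :=
  dangerousList.foldl
    (fun d p => d.insert (p.headD ' ') (d.getD (p.headD ' ') [] ++ [p]))
    PySem.Dict.empty

-- the loop: for i, c in enumerate(s): for p in _BY_FIRST.get(c, ()):
--   if s.startswith(p, i): return True   — s.startswith(p, i) is p prefixing s's suffix at i
def scanFrom : List Char → Bool
  | [] => false
  | c :: rest =>
      (byFirst.getD c []).any (fun p => p.isPrefixOf (c :: rest)) || scanFrom rest

-- port of B
def tool_requires_approval_py_alt (tool_name : String) : Bool :=
  scanFrom (PySem.Str.lower tool_name).toList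

-- ===== PRECONDITION & SPEC =====
def Spec_tool_requires_approval_py (tool_name : String) (out : Bool) : Prop := out = tool_requires_approval_py_alt tool_name
instance (tool_name : String) (out : Bool) : Decidable (Spec_tool_requires_approval_py tool_name out) := by unfold Spec_tool_requires_approval_py; infer_instance

-- ===== CLAIM (what is proved, stated in full; the proofs are below) =====
def Claim_equal_tool_requires_approval_py : Prop := ∀ (tool_name : String), Dom_tool_requires_approval_py tool_name → Spec_tool_requires_approval_py tool_name (tool_requires_approval_py tool_name)

-- ===== LEMMAS AND PROOFS =====

-- at any position, testing only the first-char candidates equals testing all patterns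
theorem step_eq (c : Char) (rest : List Char) :
    (byFirst.getD c []).any (fun p => p.isPrefixOf (c :: rest))
      = dangerousList.any (fun p => p.isPrefixOf (c :: rest)) := by
  by_cases h1 : c = 'e'
  · subst h1; simp [byFirst, dangerousList, PySem.Dict.insert, PySem.Dict.getD, PySem.Dict.get?, PySem.Dict.empty, List.isPrefixOf]
  by_cases h2 : c = 's'
  · subst h2; simp [byFirst, dangerousList, PySem.Dict.insert, PySem.Dict.getD, PySem.Dict.get?, PySem.Dict.empty, List.isPrefixOf]
  by_cases h3 : c = 'w'
  · subst h3; simp [byFirst, dangerousList, PySem.Dict.insert, PySem.Dict.getD, PySem.Dict.get?, PySem.Dict.empty, List.isPrefixOf]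
  by_cases h4 : c = 'd'
  · subst h4; simp [byFirst, dangerousList, PySem.Dict.insert, PySem.Dict.getD, PySem.Dict.get?, PySem.Dict.empty, List.isPrefixOf]
  by_cases h5 : c = 'r'
  · subst h5; simp [byFirst, dangerousList, PySem.Dict.insert, PySem.Dict.getD, PySem.Dict.get?, PySem.Dict.empty, List.isPrefixOf]
  by_cases h6 : c = 't'
  · subst h6; simp [byFirst, dangerousList, PySem.Dict.insert, PySem.Dict.getD, PySem.Dict.get?, PySem.Dict.empty, List.isPrefixOf]
  · simp [byFirst, dangerousList, PySem.Dict.insert, PySem.Dict.getD, PySem.Dict.get?, PySem.Dict.empty, List.isPrefixOf,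
      Ne.symm h1, Ne.symm h2, Ne.symm h3, Ne.symm h4, Ne.symm h5, Ne.symm h6]

theorem scanFrom_iff (s : List Char) :
    scanFrom s = true ↔ ∃ p ∈ dangerousList, ∃ j, p <+: s.drop j := by
  induction s with
  | nil => simp [scanFrom, dangerousList]
  | cons c rest ih =>
    simp only [scanFrom, step_eq, Bool.or_eq_true, ih, List.any_eq_true,
      List.isPrefixOf_iff_prefix]
    constructor
    · rintro (⟨p, hp, hpre⟩ | ⟨p, hp, j, hpre⟩)
      · exact ⟨p, hp, 0, by simpa using hpre⟩
      · exact ⟨p, hp, j + 1, by simpa using hpre⟩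
    · rintro ⟨p, hp, j, hpre⟩
      cases j with
      | zero => exact Or.inl ⟨p, hp, by simpa using hpre⟩
      | succ j => exact Or.inr ⟨p, hp, j, hpre⟩

theorem scanFrom_eq_any (s : List Char) :
    scanFrom s = dangerousList.any (fun p => PySem.Chars.isIn p s) := by
  rw [Bool.eq_iff_iff, scanFrom_iff, List.any_eq_true]
  constructor
  · rintro ⟨p, hp, j, hpre⟩
    exact ⟨p, hp, (PySem.Chars.exists_prefix_drop_iff_isIn p s).1 ⟨j, hpre⟩⟩
  · rintro ⟨p, hp, hin⟩
    obtain ⟨j, hpre⟩ := (PySem.Chars.exists_prefix_drop_iff_isIn p s).2 hin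
    exact ⟨p, hp, j, hpre⟩

-- ===== VERDICT (by name: the statement is the Claim_ definition above) =====
theorem tool_requires_approval_py_spec : Claim_equal_tool_requires_approval_py := by
  intro tool_name _
  show tool_requires_approval_py tool_name = tool_requires_approval_py_alt tool_name
  simp [tool_requires_approval_py, tool_requires_approval_py_alt, scanFrom_eq_any,
    dangerousList, List.any]
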